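-- pv_equiv track=rewrite | github.com/pypi-data/pypi-mirror-401 | packages/epub2text/epub2text-0.2.0-py3-none-any.whl/epub2text/parser.py | _find_chapter_for_position
-- ===== SOURCE A (Python) =====
-- from typing import Any, Optional
--
-- def _find_chapter_for_position(
--
--     doc_href: str,
--     position: int,
--     chapter_map: list[tuple[str, int, str, str]],
-- ) -> tuple[Optional[str], Optional[str]]:
--     """
--     Find which chapter a given position belongs to.
--
--     Returns:
--         Tuple of (chapter_id, chapter_title) or (None, None)
--     """
--     result_id: Optional[str] = None
--     result_title: Optional[str] = None
--
--     for ch_doc, ch_pos, ch_id, ch_title in chapter_map: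
--         if ch_doc == doc_href and ch_pos <= position:
--             result_id = ch_id
--             result_title = ch_title
--         elif ch_doc == doc_href and ch_pos > position:
--             break
--
--     return result_id, result_title
-- ===== SOURCE B (Python) =====
-- from itertools import takewhile
-- from typing import Optional
--
-- def _find_chapter_for_position(
--     doc_href: str,
--     position: int,
--     chapter_map: list[tuple[str, int, str, str]],
-- ) -> tuple[Optional[str], Optional[str]]:
--     # Phase 1: everything before the break point of the scan.
--     prefix = list(takewhile(
--         lambda e: not (e[0] == doc_href and e[1] > position),
--         chapter_map,
--     ))
--     # Phase 2: last entry for this doc in that prefix.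
--     for ch_doc, ch_pos, ch_id, ch_title in reversed(prefix):
--         if ch_doc == doc_href:
--             return ch_id, ch_title
--     return None, None
-- ===== Notes on version B (the rewrite author's own statement) =====
-- stated objective: alternative
-- what changed: Replaces A's single forward loop carrying a last-match accumulator with a two-phase shape: takewhile cuts the list at the break point, then a reverse scan of that prefix returns the first matching-doc entry.
import Mathlib
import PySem

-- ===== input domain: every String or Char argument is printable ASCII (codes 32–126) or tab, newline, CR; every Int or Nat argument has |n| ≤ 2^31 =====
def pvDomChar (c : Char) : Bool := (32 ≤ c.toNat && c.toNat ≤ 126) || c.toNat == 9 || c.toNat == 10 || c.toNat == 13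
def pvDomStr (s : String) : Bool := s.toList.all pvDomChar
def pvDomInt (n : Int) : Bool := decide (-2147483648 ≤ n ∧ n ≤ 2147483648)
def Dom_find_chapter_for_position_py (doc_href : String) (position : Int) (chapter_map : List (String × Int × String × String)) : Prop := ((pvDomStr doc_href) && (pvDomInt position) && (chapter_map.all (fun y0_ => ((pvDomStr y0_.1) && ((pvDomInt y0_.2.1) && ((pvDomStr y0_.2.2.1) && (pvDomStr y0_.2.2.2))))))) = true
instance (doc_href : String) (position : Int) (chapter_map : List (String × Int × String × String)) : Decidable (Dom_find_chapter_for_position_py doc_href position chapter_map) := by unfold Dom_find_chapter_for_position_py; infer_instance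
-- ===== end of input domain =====

-- B replaces A's forward loop with a takewhile-cut prefix followed by a reverse scan (objective: alternative decomposition).

-- ===== PORT A =====
-- A's loop: carry (result_id, result_title); update on a matching entry with ch_pos <= position,
-- break on a matching entry with ch_pos > position.
def findChapterLoopA (doc_href : String) (position : Int) :
    List (String × Int × String × String) → Option String × Option String → Option String × Option String
  | [], acc => acc
  | (ch_doc, ch_pos, ch_id, ch_title) :: rest, acc =>
    if ch_doc = doc_href ∧ ch_pos ≤ position then
      findChapterLoopA doc_href position rest (some ch_id, some ch_title)
    else if ch_doc = doc_href ∧ ch_pos > position then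
      acc
    else
      findChapterLoopA doc_href position rest acc

def find_chapter_for_position_py (doc_href : String) (position : Int) (chapter_map : List (String × Int × String × String)) : Option String × Option String :=
  findChapterLoopA doc_href position chapter_map (none, none)

-- ===== PORT B =====
def find_chapter_for_position_py_alt (doc_href : String) (position : Int) (chapter_map : List (String × Int × String × String)) : Option String × Option String :=
  let pfx := chapter_map.takeWhile (fun e => !(e.1 = doc_href ∧ e.2.1 > position : Bool))
  match pfx.reverse.find? (fun e => e.1 = doc_href) with
  | some e => (some e.2.2.1, some e.2.2.2)
  | none => (none, none)

-- ===== PRECONDITION & SPEC =====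
def Spec_find_chapter_for_position_py (doc_href : String) (position : Int) (chapter_map : List (String × Int × String × String)) (out : Option String × Option String) : Prop := out = find_chapter_for_position_py_alt doc_href position chapter_map
instance (doc_href : String) (position : Int) (chapter_map : List (String × Int × String × String)) (out : Option String × Option String) : Decidable (Spec_find_chapter_for_position_py doc_href position chapter_map out) := by unfold Spec_find_chapter_for_position_py; infer_instance

-- ===== CLAIM (what is proved, stated in full; the proofs are below) =====
def Claim_equal_find_chapter_for_position_py : Prop := ∀ (doc_href : String) (position : Int) (chapter_map : List (String × Int × String × String)), Dom_find_chapter_for_position_py doc_href position chapter_map → Spec_find_chapter_for_position_py doc_href position chapter_map (find_chapter_for_position_py doc_href position chapter_map)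

-- ===== LEMMAS AND PROOFS =====

-- A's loop from any accumulator equals B's reverse-search of the takewhile prefix, with the
-- accumulator as the fallback when no matching entry occurs in the prefix.
theorem loopA_eq_alt (doc_href : String) (position : Int)
    (l : List (String × Int × String × String)) (acc : Option String × Option String) :
    findChapterLoopA doc_href position l acc =
      (match (l.takeWhile (fun e => !(e.1 = doc_href ∧ e.2.1 > position : Bool))).reverse.find?
          (fun e => e.1 = doc_href) with
       | some e => (some e.2.2.1, some e.2.2.2)
       | none => acc) := by
  induction l generalizing acc with
  | nil => simp [findChapterLoopA]
  | cons hd tl ih =>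
    obtain ⟨ch_doc, ch_pos, ch_id, ch_title⟩ := hd
    by_cases h1 : ch_doc = doc_href ∧ ch_pos ≤ position
    · have hk : (!(ch_doc = doc_href ∧ ch_pos > position : Bool)) = true := by
        simp; exact Or.inr h1.2
      simp only [findChapterLoopA, if_pos h1, List.takeWhile_cons, hk, if_true,
        List.reverse_cons, List.find?_append, ih]
      cases hfind : ((tl.takeWhile fun e => !(e.1 = doc_href ∧ e.2.1 > position : Bool)).reverse.find?
          fun e => e.1 = doc_href) with
      | some e => simp [Option.or]
      | none => simp [Option.or, List.find?, h1.1]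
    · by_cases h2 : ch_doc = doc_href ∧ ch_pos > position
      · have hk : (!(ch_doc = doc_href ∧ ch_pos > position : Bool)) = false := by simp [h2.1, h2.2]
        simp [findChapterLoopA, h2]
      · have hd' : ¬ ch_doc = doc_href := by
          by_contra hc; rcases lt_or_ge position ch_pos with h | h
          · exact h2 ⟨hc, h⟩
          · exact h1 ⟨hc, h⟩
        have hk : (!(ch_doc = doc_href ∧ ch_pos > position : Bool)) = true := by simp [hd']
        simp only [findChapterLoopA, if_neg h1, if_neg h2, List.takeWhile_cons, hk, if_true,
          List.reverse_cons, List.find?_append, ih]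
        cases hfind : ((tl.takeWhile fun e => !(e.1 = doc_href ∧ e.2.1 > position : Bool)).reverse.find?
            fun e => e.1 = doc_href) with
        | some e => simp [Option.or]
        | none => simp [Option.or, List.find?, hd']

-- ===== VERDICT (by name: the statement is the Claim_ definition above) =====
theorem find_chapter_for_position_py_spec : Claim_equal_find_chapter_for_position_py := by
  intro doc_href position chapter_map _
  unfold Spec_find_chapter_for_position_py find_chapter_for_position_py find_chapter_for_position_py_alt
  simp only [loopA_eq_alt]
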